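-- pv_equiv track=rewrite | github.com/Beijukabruno/breast-cancer-data-collection | app.py | validate_final_followup_data
-- ===== SOURCE A (Python) =====
-- def validate_final_followup_data(followup_data):
--     """Validate final follow-up form data"""
--     if not followup_data:
--         return False
--
--     # Check required fields
--     required_fields = ['last_review_date', 'general_condition', 'followup_attendance', 'patient_status']
--
--     for field in required_fields:
--         if field not in followup_data or not followup_data[field]:
--             return False
--
--     # Additional validation for conditional fields
--     if followup_data.get('followup_attendance') == 'No' and not followup_data.get('no_followup_reason'):
--         return False
--
--     if followup_data.get('recurrence') == 'Yes' and not followup_data.get('recurrence_date'):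
--         return False
--
--     if followup_data.get('patient_status') == 'Deceased':
--         if not followup_data.get('death_date') or not followup_data.get('death_cause'):
--             return False
--
--     return True
-- ===== SOURCE B (Python) =====
-- def validate_final_followup_data(followup_data):
--     """Validate final follow-up form data.
--
--     Single pass over the submitted items: collect the set of keys holding a
--     truthy value while simultaneously computing the full set of required
--     fields (the base fields plus any fields a submitted (key, value) pair
--     triggers), then decide with one subset test.
--     """
--     if not followup_data:
--         return False
--     extra = {
--         ('followup_attendance', 'No'): ('no_followup_reason',),
--         ('recurrence', 'Yes'): ('recurrence_date',),
--         ('patient_status', 'Deceased'): ('death_date', 'death_cause'),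
--     }
--     required = {'last_review_date', 'general_condition',
--                 'followup_attendance', 'patient_status'}
--     truthy = set()
--     for item in followup_data.items():
--         if item[1]:
--             truthy.add(item[0])
--         required.update(extra.get(item, ()))
--     return required <= truthy
-- ===== Notes on version B (the rewrite author's own statement) =====
-- stated objective: alternative
-- what changed: Instead of A's per-field dict lookups with early-return branches, B makes one pass over the dict's items building a set of truthy keys and simultaneously computing the full required-field set (base fields plus fields triggered by submitted (key,value) pairs), then decides with a single subset test.
import Mathlib
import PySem

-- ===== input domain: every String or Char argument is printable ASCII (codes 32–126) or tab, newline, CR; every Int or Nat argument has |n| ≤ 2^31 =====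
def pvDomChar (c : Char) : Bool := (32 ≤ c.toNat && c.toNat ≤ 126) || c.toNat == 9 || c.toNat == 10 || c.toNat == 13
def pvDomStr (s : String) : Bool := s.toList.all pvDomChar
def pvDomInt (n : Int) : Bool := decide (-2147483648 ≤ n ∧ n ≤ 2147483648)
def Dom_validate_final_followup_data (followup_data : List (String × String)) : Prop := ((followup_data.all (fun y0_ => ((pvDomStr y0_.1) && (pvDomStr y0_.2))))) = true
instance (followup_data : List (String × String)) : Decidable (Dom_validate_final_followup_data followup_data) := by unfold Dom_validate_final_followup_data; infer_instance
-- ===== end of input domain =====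

-- B replaces A's per-field lookups and inline conditional branches by ONE pass over the
-- dict's items that builds the truthy-key set and the computed required-field set, and
-- decides with a single subset test; objective: alternative (same cost, data-driven).

-- ===== PORT A =====
-- Python falsiness of a '.get(k)' / 'd[k]' string value: missing key (None) or empty string
def pvFalsy (o : Option String) : Bool :=
  match o with
  | none => true
  | some s => s == ""

-- A's 'for field in required_fields: if field not in … or not …: return False'
def pvReqLoopA (d : PySem.Dict String String) : List String → Bool
  | [] => true
  | f :: rest =>
    if !(PySem.Dict.contains d f) || pvFalsy (PySem.Dict.get? d f) then false
    else pvReqLoopA d rest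

def validate_final_followup_data (followup_data : List (String × String)) : Bool :=
  let d : PySem.Dict String String := PySem.Dict.ofList followup_data
  if followup_data = [] then false
  else if !(pvReqLoopA d ["last_review_date", "general_condition", "followup_attendance", "patient_status"]) then false
  else if (PySem.Dict.get? d "followup_attendance" == some "No") && pvFalsy (PySem.Dict.get? d "no_followup_reason") then false
  else if (PySem.Dict.get? d "recurrence" == some "Yes") && pvFalsy (PySem.Dict.get? d "recurrence_date") then false
  else if PySem.Dict.get? d "patient_status" == some "Deceased" then
    if pvFalsy (PySem.Dict.get? d "death_date") || pvFalsy (PySem.Dict.get? d "death_cause") then false else true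
  else true

-- ===== PORT B =====
-- Source B's literal dict 'extra' is keyed by full (key, value) pairs; '.get(item, ())' on a
-- three-entry literal dict is ported exactly as the first-match if-chain over its entries.
def pvExtra (item : String × String) : List String :=
  if item = ("followup_attendance", "No") then ["no_followup_reason"]
  else if item = ("recurrence", "Yes") then ["recurrence_date"]
  else if item = ("patient_status", "Deceased") then ["death_date", "death_cause"]
  else []

def validate_final_followup_data_alt (followup_data : List (String × String)) : Bool :=
  if followup_data = [] then false
  else
    let d : PySem.Dict String String := PySem.Dict.ofList followup_data
    let st := d.items.foldl
      (fun (st : PySem.Set String × PySem.Set String) item =>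
        ((if !(item.2 == "") then PySem.Set.add st.1 item.1 else st.1),
         PySem.Set.update st.2 (pvExtra item)))
      (PySem.Set.ofList [],
       PySem.Set.ofList ["last_review_date", "general_condition", "followup_attendance", "patient_status"])
    PySem.Set.issubset st.2 st.1

-- ===== PRECONDITION & SPEC =====
def Spec_validate_final_followup_data (followup_data : List (String × String)) (out : Bool) : Prop := out = validate_final_followup_data_alt followup_data
instance (followup_data : List (String × String)) (out : Bool) : Decidable (Spec_validate_final_followup_data followup_data out) := by unfold Spec_validate_final_followup_data; infer_instance

-- ===== CLAIM (what is proved, stated in full; the proofs are below) =====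
def Claim_equal_validate_final_followup_data : Prop := ∀ (followup_data : List (String × String)), Dom_validate_final_followup_data followup_data → Spec_validate_final_followup_data followup_data (validate_final_followup_data followup_data)

-- ===== LEMMAS AND PROOFS =====

-- membership in B's truthy-key accumulator
lemma mem_truthy_foldl (l : List (String × String)) (s : PySem.Set String) (y : String) :
    (y ∈ l.foldl (fun s p => if !(p.2 == "") then PySem.Set.add s p.1 else s) s) ↔
      y ∈ s ∨ ∃ v, (y, v) ∈ l ∧ v ≠ "" := by
  induction l generalizing s with
  | nil => simp
  | cons p l ih =>
    obtain ⟨k, v0⟩ := p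
    simp only [List.foldl_cons, ih, List.mem_cons, Prod.mk.injEq]
    by_cases hp : v0 = ""
    · subst hp
      simp only [beq_self_eq_true, Bool.not_true, Bool.false_eq_true, if_false]
      constructor
      · rintro (h | h)
        · exact Or.inl h
        · rcases h with ⟨v, hv, hne⟩; exact Or.inr ⟨v, Or.inr hv, hne⟩
      · rintro (h | ⟨v, hv | hv, hne⟩)
        · exact Or.inl h
        · exact absurd hv.2 hne
        · exact Or.inr ⟨v, hv, hne⟩
    · have : (!(v0 == "")) = true := by simp [hp]
      simp only [this, if_true, PySem.Set.mem_add]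
      constructor
      · rintro ((h | h) | h)
        · exact Or.inl h
        · subst h; exact Or.inr ⟨v0, Or.inl ⟨rfl, rfl⟩, hp⟩
        · rcases h with ⟨v, hv, hne⟩; exact Or.inr ⟨v, Or.inr hv, hne⟩
      · rintro (h | ⟨v, hv | hv, hne⟩)
        · exact Or.inl (Or.inl h)
        · exact Or.inl (Or.inr hv.1)
        · exact Or.inr ⟨v, hv, hne⟩

-- membership in B's required-field accumulator
lemma mem_req_foldl (l : List (String × String)) (s : PySem.Set String) (y : String) :
    (y ∈ l.foldl (fun s p => PySem.Set.update s (pvExtra p)) s) ↔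
      y ∈ s ∨ ∃ p ∈ l, y ∈ pvExtra p := by
  induction l generalizing s with
  | nil => simp
  | cons p l ih =>
    simp only [List.foldl_cons, ih, PySem.Set.mem_update]
    constructor
    · rintro ((h | h) | h)
      · exact Or.inl h
      · exact Or.inr ⟨p, by simp, h⟩
      · rcases h with ⟨q, hq, hy⟩; exact Or.inr ⟨q, by simp [hq], hy⟩
    · rintro (h | ⟨q, hq, hy⟩)
      · exact Or.inl (Or.inl h)
      · rcases List.mem_cons.mp hq with hq | hq
        · subst hq; exact Or.inl (Or.inr hy)
        · exact Or.inr ⟨q, hq, hy⟩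

-- y was stored in the dict with a truthy value  ↔  its current lookup is truthy
lemma truthy_iff_get (d : PySem.Dict String String) (hnd : d.keys.Nodup) (y : String) :
    (∃ v, (y, v) ∈ d.items ∧ v ≠ "") ↔ pvFalsy (PySem.Dict.get? d y) = false := by
  constructor
  · rintro ⟨v, hv, hne⟩
    rw [PySem.Dict.get?_of_mem_items d hv hnd]
    simpa [pvFalsy] using hne
  · intro h
    cases hg : PySem.Dict.get? d y with
    | none => rw [hg] at h; simp [pvFalsy] at h
    | some v =>
      rw [hg] at h; simp [pvFalsy] at h
      exact ⟨v, PySem.Dict.mem_items_of_get?_eq_some d hg, h⟩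

-- a trigger pair is among the items  ↔  the current lookup returns the trigger value
lemma pair_mem_iff_get (d : PySem.Dict String String) (hnd : d.keys.Nodup) (k v : String) :
    ((k, v) ∈ d.items) ↔ PySem.Dict.get? d k = some v := by
  constructor
  · intro h; exact PySem.Dict.get?_of_mem_items d h hnd
  · intro h; exact PySem.Dict.mem_items_of_get?_eq_some d h

lemma pvReqLoopA_eq_all (d : PySem.Dict String String) (fs : List String) :
    pvReqLoopA d fs = fs.all (fun f => !(pvFalsy (PySem.Dict.get? d f))) := by
  induction fs with
  | nil => rfl
  | cons f rest ih =>
    simp only [pvReqLoopA, List.all_cons]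
    cases hc : PySem.Dict.contains d f with
    | false =>
      have hn : PySem.Dict.get? d f = none := by
        rw [PySem.Dict.get?_eq_none_iff_contains, hc]
      simp [hn, pvFalsy]
    | true =>
      cases hf : pvFalsy (PySem.Dict.get? d f)
      · simp [ih]
      · simp

-- ===== VERDICT (by name: the statement is the Claim_ definition above) =====
theorem validate_final_followup_data_spec : Claim_equal_validate_final_followup_data := by
  intro fd _
  unfold Spec_validate_final_followup_data
  unfold validate_final_followup_data validate_final_followup_data_alt
  by_cases hfd : fd = []
  · simp [hfd]
  · simp only [hfd, if_false]
    set d : PySem.Dict String String := PySem.Dict.ofList fd with hd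
    have hnd : d.keys.Nodup := PySem.Dict.nodup_keys_ofList fd
    rw [PySem.List.foldl_prod_mk
      (f := fun s (p : String × String) => if !(p.2 == "") then PySem.Set.add s p.1 else s)
      (g := fun s (p : String × String) => PySem.Set.update s (pvExtra p))]
    set T : PySem.Set String :=
      d.items.foldl (fun s p => if !(p.2 == "") then PySem.Set.add s p.1 else s)
        (PySem.Set.ofList []) with hT
    set R : PySem.Set String :=
      d.items.foldl (fun s p => PySem.Set.update s (pvExtra p))
        (PySem.Set.ofList ["last_review_date", "general_condition", "followup_attendance", "patient_status"]) with hR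
    have hmem : ∀ y, y ∈ R ↔
        (y ∈ (["last_review_date", "general_condition", "followup_attendance", "patient_status"] : List String) ∨
          ∃ p ∈ d.items, y ∈ pvExtra p) := by
      intro y; rw [hR, mem_req_foldl]; simp [PySem.Set.mem_ofList]
    have htr : ∀ y, y ∈ T ↔ pvFalsy (PySem.Dict.get? d y) = false := by
      intro y; rw [hT, mem_truthy_foldl, ← truthy_iff_get d hnd]; simp
    have key : (∀ y ∈ R, y ∈ T) ↔
        ((pvFalsy (PySem.Dict.get? d "last_review_date") = false ∧
          pvFalsy (PySem.Dict.get? d "general_condition") = false ∧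
          pvFalsy (PySem.Dict.get? d "followup_attendance") = false ∧
          pvFalsy (PySem.Dict.get? d "patient_status") = false) ∧
         (PySem.Dict.get? d "followup_attendance" = some "No" →
            pvFalsy (PySem.Dict.get? d "no_followup_reason") = false) ∧
         (PySem.Dict.get? d "recurrence" = some "Yes" →
            pvFalsy (PySem.Dict.get? d "recurrence_date") = false) ∧
         (PySem.Dict.get? d "patient_status" = some "Deceased" →
            pvFalsy (PySem.Dict.get? d "death_date") = false ∧
            pvFalsy (PySem.Dict.get? d "death_cause") = false)) := by
      constructor
      · intro h
        refine ⟨⟨?_, ?_, ?_, ?_⟩, ?_, ?_, ?_⟩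
        · exact (htr _).mp (h _ ((hmem _).mpr (Or.inl (by simp))))
        · exact (htr _).mp (h _ ((hmem _).mpr (Or.inl (by simp))))
        · exact (htr _).mp (h _ ((hmem _).mpr (Or.inl (by simp))))
        · exact (htr _).mp (h _ ((hmem _).mpr (Or.inl (by simp))))
        · intro hg
          exact (htr _).mp (h _ ((hmem _).mpr (Or.inr
            ⟨("followup_attendance", "No"), (pair_mem_iff_get d hnd _ _).mpr hg, by simp [pvExtra]⟩)))
        · intro hg
          exact (htr _).mp (h _ ((hmem _).mpr (Or.inr
            ⟨("recurrence", "Yes"), (pair_mem_iff_get d hnd _ _).mpr hg, by simp [pvExtra]⟩)))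
        · intro hg
          constructor <;>
            exact (htr _).mp (h _ ((hmem _).mpr (Or.inr
              ⟨("patient_status", "Deceased"), (pair_mem_iff_get d hnd _ _).mpr hg, by simp [pvExtra]⟩)))
      · rintro ⟨⟨h1, h2, h3, h4⟩, hA, hB, hC⟩ y hy
        rw [hmem] at hy
        rw [htr]
        rcases hy with hy | ⟨p, hp, hyp⟩
        · fin_cases hy <;> assumption
        · have hget := (pair_mem_iff_get d hnd p.1 p.2).mp (by simpa using hp)
          by_cases e1 : p = ("followup_attendance", "No")
          · subst e1; simp [pvExtra] at hyp; subst hyp; exact hA hget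
          · by_cases e2 : p = ("recurrence", "Yes")
            · subst e2; simp [pvExtra] at hyp; subst hyp; exact hB hget
            · by_cases e3 : p = ("patient_status", "Deceased")
              · subst e3
                simp [pvExtra, e1, e2] at hyp
                rcases hyp with hyp | hyp <;> subst hyp
                · exact (hC hget).1
                · exact (hC hget).2
              · simp [pvExtra, e1, e2, e3] at hyp
    rw [show ∀ a b : Bool, (a = b) = (a = true ↔ b = true) from by decide]
    rw [PySem.Set.issubset_iff R T, key]
    clear key hmem htr
    simp only [pvReqLoopA_eq_all, List.all_cons, List.all_nil]
    generalize PySem.Dict.get? d "last_review_date" = g1 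
    generalize PySem.Dict.get? d "general_condition" = g2 
    generalize PySem.Dict.get? d "followup_attendance" = g3 
    generalize PySem.Dict.get? d "patient_status" = g4 
    generalize PySem.Dict.get? d "no_followup_reason" = g5 
    generalize PySem.Dict.get? d "recurrence" = g6 
    generalize PySem.Dict.get? d "recurrence_date" = g7 
    generalize PySem.Dict.get? d "death_date" = g8 
    generalize PySem.Dict.get? d "death_cause" = g9
    by_cases c1 : pvFalsy g1 = false <;>
      by_cases c2 : pvFalsy g2 = false <;>
      by_cases c3 : pvFalsy g3 = false <;>
      by_cases c4 : pvFalsy g4 = false <;>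
      by_cases c5 : g3 = some "No" <;>
      by_cases c6 : g6 = some "Yes" <;>
      by_cases c7 : g4 = some "Deceased" <;>
      simp_all
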